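-- pv_equiv track=rewrite | github.com/JeiKeiLim/TIL | coding_test/leetcode/1726_Tuple_with_Same_Product.py | tupleSameProduct2
-- ===== SOURCE A (Python) =====
-- from typing import List
--
-- def tupleSameProduct2(nums: List[int]) -> int:
--     n = len(nums)
--     num_sets = {}
--     for i in range(n - 1):
--         x = nums[i]
--         for j in range(i + 1, n):
--             y = x * nums[j]
--             num_sets[y] = num_sets.get(y, 0) + 1
--
--     return sum((m * (m - 1)) for m in num_sets.values()) * 4
-- ===== SOURCE B (Python) =====
-- from typing import List
--
-- def tupleSameProduct2(nums: List[int]) -> int: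
--     n = len(nums)
--     prods = sorted(nums[i] * nums[j] for i in range(n - 1) for j in range(i + 1, n))
--     prev = None
--     run = 0
--     acc = 0
--     for p in prods:
--         if prev is not None and p == prev:
--             acc += 2 * run
--             run += 1
--         else:
--             run = 1
--         prev = p
--     return acc * 4
-- ===== Notes on version B (the rewrite author's own statement) =====
-- stated objective: alternative
-- what changed: B replaces A's hash-counting (product-count dict plus a second pass summing m*(m-1) over its values) with sort-then-scan: it sorts the list of pair products and walks it once tracking the current run length, adding 2*run per extension of a run of equal products; no dictionary at all.
import Mathlib
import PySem

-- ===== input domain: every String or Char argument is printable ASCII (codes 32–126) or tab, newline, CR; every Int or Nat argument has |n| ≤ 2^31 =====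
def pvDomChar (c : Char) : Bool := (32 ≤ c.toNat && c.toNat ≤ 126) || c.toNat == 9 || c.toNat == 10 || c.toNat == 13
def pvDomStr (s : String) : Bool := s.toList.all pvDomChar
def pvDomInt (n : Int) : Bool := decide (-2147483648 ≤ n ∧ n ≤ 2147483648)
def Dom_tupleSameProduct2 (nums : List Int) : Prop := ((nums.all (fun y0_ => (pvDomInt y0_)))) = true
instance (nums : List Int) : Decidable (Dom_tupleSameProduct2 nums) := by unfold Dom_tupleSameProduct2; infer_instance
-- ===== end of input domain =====

-- B replaces A's product-count dict (plus a second pass summing m*(m-1) over its values) by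
-- sort-then-scan: sort the list of pair products and walk it once, tracking the current run of
-- equal products and adding 2*run per run extension; an alternative algorithm, no dictionary.

-- ===== PORT A =====
def tupleSameProduct2 (nums : List Int) : Int :=
  let n : Int := nums.length
  let num_sets : PySem.Dict Int Int :=
    (PySem.List.pyRange 0 (n - 1) 1).foldl (fun d i =>
      let x := PySem.List.pyGetD nums i 0
      (PySem.List.pyRange (i + 1) n 1).foldl (fun d j =>
        let y := x * PySem.List.pyGetD nums j 0
        d.insert y (d.getD y 0 + 1)) d) PySem.Dict.empty
  (num_sets.values.foldl (fun s m => s + m * (m - 1)) 0) * 4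

-- ===== PORT B =====
/-- B's loop body: state is (prev, run, acc); on a repeat of prev, add 2*run and extend the run. -/
def bStep (st : Option Int × Int × Int) (p : Int) : Option Int × Int × Int :=
  match st.1 with
  | some v => if p = v then (some p, st.2.1 + 1, st.2.2 + 2 * st.2.1) else (some p, 1, st.2.2)
  | none => (some p, 1, st.2.2)

def tupleSameProduct2_alt (nums : List Int) : Int :=
  let n : Int := nums.length
  let prods := PySem.List.sorted
    ((PySem.List.pyRange 0 (n - 1) 1).flatMap (fun i =>
      (PySem.List.pyRange (i + 1) n 1).map
        (fun j => PySem.List.pyGetD nums i 0 * PySem.List.pyGetD nums j 0)))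
    (fun x => x) false
  (prods.foldl bStep (none, 0, 0)).2.2 * 4

-- ===== PRECONDITION & SPEC =====
def Spec_tupleSameProduct2 (nums : List Int) (out : Int) : Prop := out = tupleSameProduct2_alt nums
instance (nums : List Int) (out : Int) : Decidable (Spec_tupleSameProduct2 nums out) := by unfold Spec_tupleSameProduct2; infer_instance

-- ===== CLAIM (what is proved, stated in full; the proofs are below) =====
def Claim_equal_tupleSameProduct2 : Prop := ∀ (nums : List Int), Dom_tupleSameProduct2 nums → Spec_tupleSameProduct2 nums (tupleSameProduct2 nums)

-- ===== LEMMAS AND PROOFS =====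

/-- A's dict step on one product value. -/
def stepA (d : PySem.Dict Int Int) (y : Int) : PySem.Dict Int Int :=
  d.insert y (d.getD y 0 + 1)

/-- Proof helper: A's dict step paired with a running sum of pre-increment counts. -/
def stepP (st : PySem.Dict Int Int × Int) (y : Int) : PySem.Dict Int Int × Int :=
  (st.1.insert y (st.1.getD y 0 + 1), st.2 + st.1.getD y 0)

/-- A's final aggregation: sum of m*(m-1) over the dict's values. -/
def sumPairs (d : PySem.Dict Int Int) : Int :=
  (d.values.map (fun m => m * (m - 1))).sum

/-- Number of equal pairs in a list: sum over positions of the count of that element before it. -/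
def eqPairs : List Int → Int
  | [] => 0
  | a :: l => (l.count a : Int) + eqPairs l

/-- Sum over a list of a dict's counts. -/
def dSum (d : PySem.Dict Int Int) (l : List Int) : Int :=
  (l.map (fun y => d.getD y 0)).sum

/-- Replacing g by g' at a single element y of a Nodup list shifts the mapped sum by g' y - g y. -/
lemma sum_map_update (l : List Int) (hn : l.Nodup) (y : Int) (hy : y ∈ l)
    (g g' : Int → Int) (hne : ∀ k ∈ l, k ≠ y → g' k = g k) :
    (l.map g').sum = (l.map g).sum + (g' y - g y) := by
  induction l with
  | nil => cases hy
  | cons a l ih =>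
    rcases List.mem_cons.mp hy with rfl | hmem
    · have : ∀ k ∈ l, g' k = g k := by
        intro k hk
        exact hne k (List.mem_cons_of_mem _ hk) (fun h => (List.nodup_cons.mp hn).1 (h ▸ hk))
      simp [List.map_congr_left this]
      ring
    · have hay : a ≠ y := fun h => (List.nodup_cons.mp hn).1 (h ▸ hmem)
      have := ih (List.nodup_cons.mp hn).2 hmem (fun k hk h => hne k (List.mem_cons_of_mem _ hk) h)
      simp [this, hne a (List.mem_cons_self) hay]
      ring

/-- One stepA raises the value-sum of m*(m-1) by exactly twice the pre-increment count. -/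
lemma sumPairs_stepA (d : PySem.Dict Int Int) (hn : d.keys.Nodup) (y : Int) :
    sumPairs (stepA d y) = sumPairs d + 2 * d.getD y 0 := by
  have hn' : (stepA d y).keys.Nodup := PySem.Dict.nodup_keys_insert d y _ hn
  rw [sumPairs, sumPairs, PySem.Dict.values_eq_map_keys _ hn' 0, PySem.Dict.values_eq_map_keys d hn 0,
      List.map_map, List.map_map]
  simp only [Function.comp_def]
  by_cases hc : d.contains y
  · rw [show (stepA d y).keys = d.keys from PySem.Dict.keys_insert_of_contains d _ hc]
    have hy : y ∈ d.keys := (PySem.Dict.contains_iff_mem_keys d y).mp hc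
    rw [sum_map_update d.keys hn y hy
        (fun k => d.getD k 0 * (d.getD k 0 - 1))
        (fun k => (stepA d y).getD k 0 * ((stepA d y).getD k 0 - 1))
        (by intro k hk hne; simp [stepA, PySem.Dict.getD_insert_of_ne d _ _ hne])]
    simp [stepA, PySem.Dict.getD_insert_self]
    ring
  · have hc' : d.contains y = false := by simpa using hc
    rw [show (stepA d y).keys = d.keys ++ [y] from PySem.Dict.keys_insert_of_not_contains d _ hc']
    have hy0 : d.getD y 0 = 0 := PySem.Dict.getD_of_not_contains d 0 hc'
    have hmap : ∀ k ∈ d.keys, ((stepA d y).getD k 0) * ((stepA d y).getD k 0 - 1)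
        = (d.getD k 0) * (d.getD k 0 - 1) := by
      intro k hk
      have hne : k ≠ y := fun h => by
        exact absurd ((PySem.Dict.contains_iff_mem_keys d y).mpr (h ▸ hk)) (by simp [hc'])
      simp [stepA, PySem.Dict.getD_insert_of_ne d _ _ hne]
    simp only [List.map_append, List.sum_append]
    rw [List.map_congr_left (by intro k hk; exact hmap k hk)]
    simp [stepA, PySem.Dict.getD_insert_self, hy0]

/-- Joint invariant: the dicts agree, keys stay Nodup, and the value-sum of m*(m-1)
    advances by twice the running sum of pre-increment counts. -/
lemma fold_invariant (ys : List Int) : ∀ (d : PySem.Dict Int Int) (a : Int), d.keys.Nodup →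
    (ys.foldl stepP (d, a)).1 = ys.foldl stepA d
    ∧ (ys.foldl stepA d).keys.Nodup
    ∧ sumPairs (ys.foldl stepA d) = sumPairs d + 2 * ((ys.foldl stepP (d, a)).2 - a) := by
  induction ys with
  | nil => intro d a hn; simp [hn]
  | cons y ys ih =>
    intro d a hn
    have hsb : stepP (d, a) y = (stepA d y, a + d.getD y 0) := rfl
    have hn' : (stepA d y).keys.Nodup := PySem.Dict.nodup_keys_insert d y _ hn
    obtain ⟨h1, h2, h3⟩ := ih (stepA d y) (a + d.getD y 0) hn'
    refine ⟨by simpa [hsb] using h1, h2, ?_⟩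
    simp only [List.foldl_cons, hsb, h3, sumPairs_stepA d hn y]
    ring

/-- One stepA raises a later dict-count sum by the count of its key. -/
lemma dSum_stepA (d : PySem.Dict Int Int) (y : Int) (ys : List Int) :
    dSum (stepA d y) ys = dSum d ys + (ys.count y : Int) := by
  unfold dSum
  induction ys with
  | nil => simp
  | cons z zs ih =>
    simp only [List.map_cons, List.sum_cons, List.count_cons, ih]
    by_cases hzy : z = y
    · subst hzy
      simp [stepA, PySem.Dict.getD_insert_self]
      ring
    · simp [stepA, PySem.Dict.getD_insert_of_ne d _ _ hzy, hzy]
      ring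

/-- The running sum of pre-increment counts equals eqPairs plus the initial dict's contribution. -/
lemma stepP_acc (ys : List Int) : ∀ (d : PySem.Dict Int Int) (a : Int),
    (ys.foldl stepP (d, a)).2 = a + eqPairs ys + dSum d ys := by
  induction ys with
  | nil => intro d a; simp [eqPairs, dSum]
  | cons y ys ih =>
    intro d a
    have hsb : stepP (d, a) y = (stepA d y, a + d.getD y 0) := rfl
    simp only [List.foldl_cons, hsb, ih, eqPairs, dSum_stepA]
    simp only [dSum, List.map_cons, List.sum_cons]
    ring

/-- eqPairs is invariant under permutation. -/
lemma eqPairs_perm {l l' : List Int} (h : l.Perm l') : eqPairs l = eqPairs l' := by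
  induction h with
  | nil => rfl
  | cons a h ih => simp [eqPairs, ih, h.count_eq]
  | swap a b l =>
    simp only [eqPairs, List.count_cons]
    by_cases h : b = a
    · simp [h]
    · simp [h, Ne.symm h]
      ring
  | trans h1 h2 ih1 ih2 => exact ih1.trans ih2

/-- B's scan from a live state on a sorted tail. -/
lemma scan_some (zs : List Int) (hs : zs.Pairwise (· ≤ ·)) : ∀ (v r a : Int),
    (∀ y ∈ zs, v ≤ y) →
    (zs.foldl bStep (some v, r, a)).2.2 = a + 2 * eqPairs zs + 2 * r * (zs.count v : Int) := by
  induction zs with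
  | nil => intro v r a _; simp [eqPairs]
  | cons p rest ih =>
    intro v r a hv
    have hpr : ∀ y ∈ rest, p ≤ y := fun y hy => (List.pairwise_cons.mp hs).1 y hy
    have hrest : rest.Pairwise (· ≤ ·) := (List.pairwise_cons.mp hs).2
    by_cases hpv : p = v
    · subst hpv
      have : bStep (some p, r, a) p = (some p, r + 1, a + 2 * r) := by simp [bStep]
      rw [List.foldl_cons, this, ih hrest p (r + 1) (a + 2 * r) hpr]
      simp only [eqPairs, List.count_cons, BEq.rfl, if_true]
      push_cast
      ring
    · have : bStep (some v, r, a) p = (some p, 1, a) := by simp [bStep, hpv]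
      rw [List.foldl_cons, this, ih hrest p 1 a hpr]
      have hvp : v < p := lt_of_le_of_ne (hv p (List.mem_cons_self)) (fun h => hpv h.symm)
      have hcv : ((p :: rest).count v : Int) = 0 := by
        have : v ∉ p :: rest := by
          intro hmem
          rcases List.mem_cons.mp hmem with h | h
          · exact absurd h (ne_of_lt hvp)
          · exact absurd (hpr v h) (not_le.mpr hvp)
        simp [List.count_eq_zero_of_not_mem this]
      rw [hcv]
      simp [eqPairs]
      ring

/-- B's scan from the initial state computes twice the equal-pair count of a sorted list. -/
lemma scan_top (zs : List Int) (hs : zs.Pairwise (· ≤ ·)) :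
    (zs.foldl bStep (none, 0, 0)).2.2 = 2 * eqPairs zs := by
  cases zs with
  | nil => simp [eqPairs]
  | cons p rest =>
    have hpr : ∀ y ∈ rest, p ≤ y := fun y hy => (List.pairwise_cons.mp hs).1 y hy
    have h0 : bStep (none, 0, 0) p = (some p, 1, 0) := rfl
    rw [List.foldl_cons, h0, scan_some rest (List.pairwise_cons.mp hs).2 p 1 0 hpr]
    simp [eqPairs]
    ring

/-- A nested pair loop is a fold of the per-product step over the flattened product list. -/
lemma nested_eq_flat {σ : Type} (g : σ → Int → σ) (outer : List Int) (inner : Int → List Int)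
    (f : Int → Int → Int) (init : σ) :
    outer.foldl (fun s i => (inner i).foldl (fun s j => g s (f i j)) s) init
      = (outer.flatMap (fun i => (inner i).map (f i))).foldl g init := by
  induction outer generalizing init with
  | nil => rfl
  | cons i outer ih => simp [List.foldl_map, ih]

/-- The flattened list of pair products both versions traverse. -/
def prods (nums : List Int) : List Int :=
  (PySem.List.pyRange 0 ((nums.length : Int) - 1) 1).flatMap (fun i =>
    (PySem.List.pyRange (i + 1) (nums.length : Int) 1).map
      (fun j => PySem.List.pyGetD nums i 0 * PySem.List.pyGetD nums j 0))

lemma A_flat (nums : List Int) :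
    tupleSameProduct2 nums
      = ((prods nums).foldl stepA PySem.Dict.empty).values.foldl (fun s m => s + m * (m - 1)) 0 * 4 :=
  congrArg (fun d : PySem.Dict Int Int => d.values.foldl (fun s m => s + m * (m - 1)) 0 * 4)
    (nested_eq_flat (fun (d : PySem.Dict Int Int) (y : Int) => d.insert y (d.getD y 0 + 1))
      (PySem.List.pyRange 0 ((nums.length : Int) - 1) 1)
      (fun i => PySem.List.pyRange (i + 1) (nums.length : Int) 1)
      (fun i j => PySem.List.pyGetD nums i 0 * PySem.List.pyGetD nums j 0)
      (PySem.Dict.empty : PySem.Dict Int Int))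

lemma dSum_empty (l : List Int) : dSum PySem.Dict.empty l = 0 := by
  unfold dSum
  induction l with
  | nil => rfl
  | cons a l ih => simp [PySem.Dict.getD_empty]

theorem tupleSameProduct2_eq_alt (nums : List Int) :
    tupleSameProduct2 nums = tupleSameProduct2_alt nums := by
  rw [A_flat]
  obtain ⟨h1, h2, h3⟩ := fold_invariant (prods nums) PySem.Dict.empty 0 PySem.Dict.nodup_keys_empty
  have hS : ((prods nums).foldl stepA PySem.Dict.empty).values.foldl (fun s m => s + m * (m - 1)) 0
      = sumPairs ((prods nums).foldl stepA PySem.Dict.empty) := by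
    rw [sumPairs, PySem.List.foldl_add]; ring
  have hSe : sumPairs (PySem.Dict.empty : PySem.Dict Int Int) = 0 := rfl
  have hacc : ((prods nums).foldl stepP (PySem.Dict.empty, 0)).2 = eqPairs (prods nums) := by
    rw [stepP_acc, dSum_empty]; ring
  rw [hS, h3, hSe, hacc]
  show (0 + 2 * (eqPairs (prods nums) - 0)) * 4 = tupleSameProduct2_alt nums
  have hsorted := PySem.List.sorted_pairwise (prods nums) (fun x : Int => x)
  have hB : tupleSameProduct2_alt nums
      = ((PySem.List.sorted (prods nums) (fun x => x) false).foldl bStep (none, 0, 0)).2.2 * 4 := rfl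
  rw [hB, scan_top _ hsorted,
      eqPairs_perm (PySem.List.sorted_perm (prods nums) (fun x : Int => x) false)]
  ring

-- ===== VERDICT (by name: the statement is the Claim_ definition above) =====
theorem tupleSameProduct2_spec : Claim_equal_tupleSameProduct2 := by
  intro nums _
  exact tupleSameProduct2_eq_alt nums
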